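-- pv_equiv track=rewrite | github.com/ryrutherford/mlp-data-analysis | scripts/compute_pony_lang.py | find_totals
-- ===== SOURCE A (Python) =====
-- def find_totals(pony_counts):
--     total = 0
--     total_word_counts = {}
--     pony_word_counts = {}
--     for _, words in pony_counts.items():
--         for word, count in words.items():
--             total_word_counts[word] = count if word not in total_word_counts else total_word_counts[word] + count
--             total += count
--             pony_word_counts[word] = 1 if word not in pony_word_counts else pony_word_counts[word] + 1
--     return total, total_word_counts, pony_word_counts
-- ===== SOURCE B (Python) =====
-- def find_totals(pony_counts):
--     # Flatten once, then compute each of the three results as its own aggregation.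
--     pairs = [(w, c) for words in pony_counts.values() for (w, c) in words.items()]
--     total = sum(c for _, c in pairs)
--     total_word_counts = {}
--     for w, c in pairs:
--         total_word_counts[w] = total_word_counts.get(w, 0) + c
--     pony_word_counts = {}
--     for w, _ in pairs:
--         pony_word_counts[w] = pony_word_counts.get(w, 0) + 1
--     return total, total_word_counts, pony_word_counts
-- ===== Notes on version B (the rewrite author's own statement) =====
-- stated objective: simpler
-- what changed: Replaces A's single fused nested loop with three-way membership-tested updates by a one-step flatten of all (word,count) pairs followed by three independent aggregations (a sum and two get-default accumulations).
import Mathlib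
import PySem

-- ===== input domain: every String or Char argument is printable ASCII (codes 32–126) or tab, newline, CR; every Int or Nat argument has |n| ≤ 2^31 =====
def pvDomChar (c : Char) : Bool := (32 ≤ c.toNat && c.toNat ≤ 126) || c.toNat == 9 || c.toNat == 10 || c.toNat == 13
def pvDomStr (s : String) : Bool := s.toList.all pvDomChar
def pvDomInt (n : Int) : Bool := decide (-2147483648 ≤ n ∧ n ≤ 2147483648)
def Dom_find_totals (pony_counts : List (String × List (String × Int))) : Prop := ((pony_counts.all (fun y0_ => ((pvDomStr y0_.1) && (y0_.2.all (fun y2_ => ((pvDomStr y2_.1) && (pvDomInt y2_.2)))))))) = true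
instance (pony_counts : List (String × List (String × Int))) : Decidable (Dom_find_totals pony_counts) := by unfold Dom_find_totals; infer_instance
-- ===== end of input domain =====

-- B flattens the nested dicts once and computes the three results by three independent
-- aggregations instead of A's single fused loop; objective: simpler (not faster).

-- ===== PORT A =====
def find_totals (pony_counts : List (String × List (String × Int))) : Int × (List (String × Int)) × (List (String × Int)) :=
  let st := pony_counts.foldl (fun st p =>
      p.2.foldl (fun st wc =>
        let twc := st.2.1.insert wc.1 (if st.2.1.contains wc.1 then st.2.1.getD wc.1 0 + wc.2 else wc.2)
        let total := st.1 + wc.2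
        let pwc := st.2.2.insert wc.1 (if st.2.2.contains wc.1 then st.2.2.getD wc.1 0 + 1 else 1)
        (total, twc, pwc)) st)
    ((0 : Int), (PySem.Dict.empty : PySem.Dict String Int), (PySem.Dict.empty : PySem.Dict String Int))
  (st.1, st.2.1.items, st.2.2.items)

-- ===== PORT B =====
def find_totals_alt (pony_counts : List (String × List (String × Int))) : Int × (List (String × Int)) × (List (String × Int)) :=
  let pairs := pony_counts.flatMap (·.2)
  let total := pairs.foldl (fun s p => s + p.2) (0 : Int)
  let twc := pairs.foldl (fun d p => d.insert p.1 (d.getD p.1 0 + p.2)) (PySem.Dict.empty : PySem.Dict String Int)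
  let pwc := pairs.foldl (fun d p => d.insert p.1 (d.getD p.1 0 + 1)) (PySem.Dict.empty : PySem.Dict String Int)
  (total, twc.items, pwc.items)

-- ===== PRECONDITION & SPEC =====
def Spec_find_totals (pony_counts : List (String × List (String × Int))) (out : Int × (List (String × Int)) × (List (String × Int))) : Prop := out = find_totals_alt pony_counts
instance (pony_counts : List (String × List (String × Int))) (out : Int × (List (String × Int)) × (List (String × Int))) : Decidable (Spec_find_totals pony_counts out) := by unfold Spec_find_totals; infer_instance

-- ===== CLAIM (what is proved, stated in full; the proofs are below) =====
def Claim_equal_find_totals : Prop := ∀ (pony_counts : List (String × List (String × Int))), Dom_find_totals pony_counts → Spec_find_totals pony_counts (find_totals pony_counts)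

-- ===== LEMMAS AND PROOFS =====

-- A's fused loop body equals the three independent updates, componentwise.
theorem fused_step_eq (st : Int × PySem.Dict String Int × PySem.Dict String Int)
    (wc : String × Int) :
    (st.1 + wc.2,
     st.2.1.insert wc.1 (if st.2.1.contains wc.1 then st.2.1.getD wc.1 0 + wc.2 else wc.2),
     st.2.2.insert wc.1 (if st.2.2.contains wc.1 then st.2.2.getD wc.1 0 + 1 else 1)) =
    (st.1 + wc.2,
     st.2.1.insert wc.1 (st.2.1.getD wc.1 0 + wc.2),
     st.2.2.insert wc.1 (st.2.2.getD wc.1 0 + 1)) := by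
  refine Prod.ext rfl (Prod.ext ?_ ?_) <;> simp only
  · by_cases h : st.2.1.contains wc.1 = true
    · simp [h]
    · simp [h, PySem.Dict.getD_of_not_contains _ _ (by simpa using h)]
  · by_cases h : st.2.2.contains wc.1 = true
    · simp [h]
    · simp [h, PySem.Dict.getD_of_not_contains _ _ (by simpa using h)]

-- the fused fold over any pair list splits into the three separate folds
theorem fused_fold_split (pairs : List (String × Int))
    (t : Int) (d1 d2 : PySem.Dict String Int) :
    pairs.foldl (fun st wc =>
        let twc := st.2.1.insert wc.1 (if st.2.1.contains wc.1 then st.2.1.getD wc.1 0 + wc.2 else wc.2)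
        let total := st.1 + wc.2
        let pwc := st.2.2.insert wc.1 (if st.2.2.contains wc.1 then st.2.2.getD wc.1 0 + 1 else 1)
        (total, twc, pwc)) (t, d1, d2) =
    (pairs.foldl (fun s p => s + p.2) t,
     pairs.foldl (fun d p => d.insert p.1 (d.getD p.1 0 + p.2)) d1,
     pairs.foldl (fun d p => d.insert p.1 (d.getD p.1 0 + 1)) d2) := by
  induction pairs generalizing t d1 d2 with
  | nil => rfl
  | cons wc rest ih =>
    simp only [List.foldl_cons]
    rw [show (let twc := d1.insert wc.1 (if d1.contains wc.1 then d1.getD wc.1 0 + wc.2 else wc.2)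
              let total := t + wc.2
              let pwc := d2.insert wc.1 (if d2.contains wc.1 then d2.getD wc.1 0 + 1 else 1)
              (total, twc, pwc)) = _ from fused_step_eq (t, d1, d2) wc]
    exact ih _ _ _

-- nested fold over the outer list equals the fold over the flattened pair list
theorem nested_eq_flat (f : (Int × PySem.Dict String Int × PySem.Dict String Int) → (String × Int) → (Int × PySem.Dict String Int × PySem.Dict String Int))
    (l : List (String × List (String × Int))) (st : Int × PySem.Dict String Int × PySem.Dict String Int) :
    l.foldl (fun st p => p.2.foldl f st) st = (l.flatMap (·.2)).foldl f st := by
  induction l generalizing st with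
  | nil => rfl
  | cons p rest ih => simp [List.flatMap_cons, List.foldl_append, ih]

-- ===== VERDICT (by name: the statement is the Claim_ definition above) =====
theorem find_totals_spec : Claim_equal_find_totals := by
  intro pony_counts _
  unfold Spec_find_totals find_totals find_totals_alt
  simp only [nested_eq_flat, fused_fold_split]
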